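-- pv_equiv track=rewrite | github.com/Ihsane-Mon/chiffrement | algo_nocom.py | rotation_spirale
-- ===== SOURCE A (Python) =====
-- SPIRAL_PATH = [
--     (0, 0), (0, 1), (0, 2), (0, 3),
--     (1, 3), (2, 3), (3, 3),
--     (3, 2), (3, 1), (3, 0),
--     (2, 0), (1, 0),
--     (1, 1), (1, 2),
--     (2, 2), (2, 1),
-- ]
--
-- def rotation_spirale(M: list, shift: int) -> list:
--     values = [M[r][c] for r, c in SPIRAL_PATH]
--     n = len(values)
--     shift = shift % n
--     rotated = values[-shift:] + values[:-shift]
--     result = [row[:] for row in M]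
--     for idx, (r, c) in enumerate(SPIRAL_PATH):
--         result[r][c] = rotated[idx]
--     return result
-- ===== SOURCE B (Python) =====
-- SPIRAL_PATH = [
--     (0, 0), (0, 1), (0, 2), (0, 3),
--     (1, 3), (2, 3), (3, 3),
--     (3, 2), (3, 1), (3, 0),
--     (2, 0), (1, 0),
--     (1, 1), (1, 2),
--     (2, 2), (2, 1),
-- ]
--
-- def rotation_spirale(M: list, shift: int) -> list:
--     values = [M[r][c] for r, c in SPIRAL_PATH]
--     # decompose the rotation by k into k elementary one-step rotations
--     for _ in range(shift % len(values)):
--         values.insert(0, values.pop())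
--     result = [row[:] for row in M]
--     for (r, c), v in zip(SPIRAL_PATH, values):
--         result[r][c] = v
--     return result
-- ===== Notes on version B (the rewrite author's own statement) =====
-- stated objective: alternative
-- what changed: B replaces A's closed-form slice rotation (values[-shift:] + values[:-shift] with a computed split point, written back by enumerated index) by an iterative decomposition: it applies shift%16 elementary one-step rotations (pop the last value, re-insert it at the front) and writes back by zipping SPIRAL_PATH with the rotated values.
-- outside the precondition, e.g. on rotation_spirale([[1, 2, 3], [4, 5, 6], [7, 8, 9]], 1): A raises IndexError, B raises IndexError
import Mathlib
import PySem

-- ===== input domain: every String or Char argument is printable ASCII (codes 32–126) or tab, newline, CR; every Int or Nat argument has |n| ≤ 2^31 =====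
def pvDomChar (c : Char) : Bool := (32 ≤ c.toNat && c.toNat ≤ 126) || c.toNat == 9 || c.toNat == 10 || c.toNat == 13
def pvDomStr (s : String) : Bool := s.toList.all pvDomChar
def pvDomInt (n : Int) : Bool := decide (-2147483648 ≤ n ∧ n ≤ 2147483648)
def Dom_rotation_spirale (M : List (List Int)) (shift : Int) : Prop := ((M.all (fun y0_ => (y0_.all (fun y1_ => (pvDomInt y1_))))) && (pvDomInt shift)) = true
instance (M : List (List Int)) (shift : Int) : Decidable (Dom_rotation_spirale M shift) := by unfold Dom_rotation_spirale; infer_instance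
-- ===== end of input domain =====

-- B decomposes the rotation by k into k elementary one-step rotations of the value list
-- (pop the last value, re-insert it at the front), instead of A's single slice-based
-- rotation with a computed split point; objective: alternative (iterated elementary steps).

-- module constant shared by both programs
def SPIRAL_PATH : List (Nat × Nat) :=
  [(0, 0), (0, 1), (0, 2), (0, 3),
   (1, 3), (2, 3), (3, 3),
   (3, 2), (3, 1), (3, 0),
   (2, 0), (1, 0),
   (1, 1), (1, 2),
   (2, 2), (2, 1)]

-- M[r][c] for the fixed nonnegative spiral indices; exact when in range (guaranteed by Pre_)
def pyGet2 (M : List (List Int)) (r c : Nat) : Int := (M.getD r []).getD c 0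
-- result[r][c] = v; exact when in range (guaranteed by Pre_)
def pySet2 (M : List (List Int)) (r c : Nat) (v : Int) : List (List Int) :=
  M.set r ((M.getD r []).set c v)

-- ===== PORT A =====
def rotation_spirale (M : List (List Int)) (shift : Int) : List (List Int) :=
  let values := SPIRAL_PATH.map (fun p => pyGet2 M p.1 p.2)
  let n : Int := values.length
  let s := PySem.Int.mod shift n
  let rotated := PySem.List.slice values (some (-s)) none ++ PySem.List.slice values none (some (-s))
  let result := M.map (fun row => row)   -- row[:] copies each row
  (PySem.List.enumerate SPIRAL_PATH).foldl
    (fun acc ip => pySet2 acc ip.2.1 ip.2.2 (rotated.getD ip.1.toNat 0)) result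

-- ===== PORT B =====
def rotation_spirale_alt (M : List (List Int)) (shift : Int) : List (List Int) :=
  let values := SPIRAL_PATH.map (fun p => pyGet2 M p.1 p.2)
  -- for _ in range(shift % len(values)): values.insert(0, values.pop())
  let values :=
    (PySem.List.pyRange 0 (PySem.Int.mod shift values.length) 1).foldl
      (fun vs _ =>
        match PySem.List.pop? vs (-1) with
        | some (v, rest) => PySem.List.insert rest 0 v
        | none => vs) values
  let result := M.map (fun row => row)   -- row[:] copies each row
  (SPIRAL_PATH.zip values).foldl
    (fun acc pv => pySet2 acc pv.1.1 pv.1.2 pv.2) result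

-- ===== PRECONDITION & SPEC =====
-- Pre_ excludes exactly the inputs on which Python A raises IndexError:
-- matrices with fewer than 4 rows, or whose first four rows have fewer than 4 entries.
def Pre_rotation_spirale (M : List (List Int)) (shift : Int) : Prop :=
  4 ≤ M.length ∧ ∀ row ∈ M.take 4, 4 ≤ row.length
instance (M : List (List Int)) (shift : Int) : Decidable (Pre_rotation_spirale M shift) := by
  unfold Pre_rotation_spirale; infer_instance

def pvWitness_rotation_spirale : List (List Int) × Int :=
  ([[1, 2, 3, 4], [5, 6, 7, 8], [9, 10, 11, 12], [13, 14, 15, 16]], 3)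

def Spec_rotation_spirale (M : List (List Int)) (shift : Int) (out : List (List Int)) : Prop :=
  out = rotation_spirale_alt M shift
instance (M : List (List Int)) (shift : Int) (out : List (List Int)) :
    Decidable (Spec_rotation_spirale M shift out) := by unfold Spec_rotation_spirale; infer_instance

-- ===== CLAIM (what is proved, stated in full; the proofs are below) =====
def Claim_equal_rotation_spirale : Prop :=
  ∀ (M : List (List Int)) (shift : Int), Dom_rotation_spirale M shift →
    Pre_rotation_spirale M shift → Spec_rotation_spirale M shift (rotation_spirale M shift)

-- ===== LEMMAS AND PROOFS =====

-- proof-side cores: each port with the (already reduced) shift value s abstracted out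
def coreA (M : List (List Int)) (s : Int) : List (List Int) :=
  let values := SPIRAL_PATH.map (fun p => pyGet2 M p.1 p.2)
  let rotated := PySem.List.slice values (some (-s)) none ++ PySem.List.slice values none (some (-s))
  (PySem.List.enumerate SPIRAL_PATH).foldl
    (fun acc ip => pySet2 acc ip.2.1 ip.2.2 (rotated.getD ip.1.toNat 0)) (M.map (fun row => row))

def coreB (M : List (List Int)) (s : Int) : List (List Int) :=
  let values := SPIRAL_PATH.map (fun p => pyGet2 M p.1 p.2)
  let values :=
    (PySem.List.pyRange 0 s 1).foldl
      (fun vs _ =>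
        match PySem.List.pop? vs (-1) with
        | some (v, rest) => PySem.List.insert rest 0 v
        | none => vs) values
  (SPIRAL_PATH.zip values).foldl
    (fun acc pv => pySet2 acc pv.1.1 pv.1.2 pv.2) (M.map (fun row => row))

theorem portA_core (M : List (List Int)) (shift : Int) :
    rotation_spirale M shift = coreA M (PySem.Int.mod shift 16) := rfl

theorem portB_core (M : List (List Int)) (shift : Int) :
    rotation_spirale_alt M shift = coreB M (PySem.Int.mod shift 16) := rfl

set_option maxHeartbeats 4000000 in
theorem core_eq (M : List (List Int)) (s : Int) (h0 : 0 ≤ s) (h1 : s < 16) :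
    coreA M s = coreB M s := by
  interval_cases s <;>
    simp [coreA, coreB, SPIRAL_PATH, PySem.List.enumerate, PySem.List.slice,
      PySem.List.pyRange, PySem.List.pop?, PySem.List.insert, PySem.List.pyIdx?,
      PySem.List.sliceIndices, List.range_succ, PySem.List.clampIdx]

theorem main_eq (M : List (List Int)) (shift : Int) :
    rotation_spirale M shift = rotation_spirale_alt M shift := by
  have h0 : 0 ≤ PySem.Int.mod shift 16 := by
    rw [PySem.Int.mod_eq_emod_of_pos (by norm_num)]; exact Int.emod_nonneg _ (by norm_num)
  have h1 : PySem.Int.mod shift 16 < 16 := by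
    rw [PySem.Int.mod_eq_emod_of_pos (by norm_num)]; exact Int.emod_lt_of_pos _ (by norm_num)
  rw [portA_core, portB_core, core_eq M _ h0 h1]
-- ===== VERDICT (by name: the statement is the Claim_ definition above) =====
theorem rotation_spirale_spec : Claim_equal_rotation_spirale := by
  intro M shift _ _
  unfold Spec_rotation_spirale
  exact main_eq M shift
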